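-- pv_equiv track=rewrite | github.com/limmesi/RS232_communication | utils.py | txt2frame
-- ===== SOURCE A (Python) =====
-- def txt2frame(text):
--     ded_text = list(text.encode('ascii'))
--     framed_text = []
--     for dec_char in ded_text:
--         # dec to bin
--         bin_char = bin(dec_char)[2:]
--         # padding to 8 bits
--         while len(bin_char) < 8:
--             bin_char = '0' + bin_char
--         # reversing MSB:LSB to LSB:MSB
--         r_bin_char = bin_char[::-1]
--         # append start and stop bits
--         frame = '1' + r_bin_char + '00'
--         framed_text.append(frame)
--
--     return framed_text
-- ===== SOURCE B (Python) =====
-- def txt2frame(text):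
--     framed_text = []
--     for b in list(text.encode('ascii')):
--         bits = ''
--         for _ in range(8):
--             bits += str(b & 1)
--             b >>= 1
--         framed_text.append('1' + bits + '00')
--     return framed_text
-- ===== Notes on version B (the rewrite author's own statement) =====
-- stated objective: alternative
-- what changed: Per byte, B builds the LSB-first bit string directly with a fixed 8-step loop of `b & 1` / `b >>= 1`, eliminating A's bin()-string slicing, while-loop zero padding and slice reversal.
import Mathlib
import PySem

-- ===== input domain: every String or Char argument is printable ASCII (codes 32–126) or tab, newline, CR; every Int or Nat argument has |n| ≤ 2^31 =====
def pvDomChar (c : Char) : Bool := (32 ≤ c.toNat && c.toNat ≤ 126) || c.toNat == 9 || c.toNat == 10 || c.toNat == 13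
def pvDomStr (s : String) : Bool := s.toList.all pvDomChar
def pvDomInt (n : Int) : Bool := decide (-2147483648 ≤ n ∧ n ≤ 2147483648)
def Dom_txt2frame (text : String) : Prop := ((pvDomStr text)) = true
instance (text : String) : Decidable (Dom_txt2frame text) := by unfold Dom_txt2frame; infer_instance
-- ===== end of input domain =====

-- B replaces A's bin()-string + while-padding + slice-reversal per byte with a fixed 8-step
-- LSB-first bit loop (b & 1 / b >>= 1); same result on ASCII input (objective: alternative).

-- ===== PORT A =====
-- bin(n)[2:] : binary digits, MSB first ("0" for n = 0)
-- (structural fuel only bounds the halving loop; fuel n always suffices since n/2 < n)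
def pvBinGoF : Nat → Nat → List Char
  | 0, _ => []
  | k + 1, n => if n = 0 then [] else pvBinGoF k (n / 2) ++ [if n % 2 = 1 then '1' else '0']

def pvBinGo (n : Nat) : List Char := pvBinGoF n n

def pvBinChars (n : Nat) : List Char :=
  if n = 0 then ['0'] else pvBinGo n

-- while len(bin_char) < 8: bin_char = '0' + bin_char
-- (structural fuel of 8 only bounds the loop — each pass lengthens l by one, so 8 always suffices)
def pvPad8Go : Nat → List Char → List Char
  | 0, l => l
  | k + 1, l => if l.length < 8 then pvPad8Go k ('0' :: l) else l

def pvPad8 (l : List Char) : List Char := pvPad8Go 8 l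

def txt2frame (text : String) : List String :=
  text.toList.foldl
    (fun framed c =>
      framed ++ [String.mk ('1' :: (pvPad8 (pvBinChars c.toNat)).reverse ++ ['0', '0'])])
    []

-- ===== PORT B =====
-- for _ in range(8): bits += str(b & 1); b >>= 1
def pvLsbBits (b : Nat) : List Char × Nat :=
  (List.range 8).foldl
    (fun p _ => (p.1 ++ [if p.2 % 2 = 1 then '1' else '0'], p.2 / 2))
    ([], b)

def txt2frame_alt (text : String) : List String :=
  text.toList.map (fun c => String.mk ('1' :: (pvLsbBits c.toNat).1 ++ ['0', '0']))

-- ===== PRECONDITION & SPEC =====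
def Spec_txt2frame (text : String) (out : List String) : Prop := out = txt2frame_alt text
instance (text : String) (out : List String) : Decidable (Spec_txt2frame text out) := by unfold Spec_txt2frame; infer_instance

-- ===== CLAIM (what is proved, stated in full; the proofs are below) =====
def Claim_equal_txt2frame : Prop := ∀ (text : String), Dom_txt2frame text → Spec_txt2frame text (txt2frame text)

-- ===== LEMMAS AND PROOFS =====
-- per-byte agreement on all ASCII codes, by exhaustive kernel evaluation
theorem pvFrame_eq : ∀ (n : Fin 128),
    '1' :: (pvPad8 (pvBinChars n.val)).reverse ++ ['0', '0'] =
      '1' :: (pvLsbBits n.val).1 ++ ['0', '0'] := by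
  decide

theorem pvFrame_eq_of_lt {n : Nat} (h : n < 128) :
    String.mk ('1' :: (pvPad8 (pvBinChars n)).reverse ++ ['0', '0']) =
      String.mk ('1' :: (pvLsbBits n).1 ++ ['0', '0']) :=
  congrArg String.mk (pvFrame_eq ⟨n, h⟩)

-- ===== VERDICT (by name: the statement is the Claim_ definition above) =====
theorem txt2frame_spec : Claim_equal_txt2frame := by
  intro text hdom
  unfold Spec_txt2frame txt2frame txt2frame_alt
  rw [PySem.List.foldl_append_singleton_eq_map]
  apply List.map_congr_left
  intro c hc
  have hd : pvDomChar c = true := by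
    have := (List.all_eq_true.mp hdom) c hc
    simpa using this
  have hlt : c.toNat < 128 := by
    simp only [pvDomChar, Bool.or_eq_true, Bool.and_eq_true, decide_eq_true_eq,
      beq_iff_eq] at hd
    omega
  exact pvFrame_eq_of_lt hlt
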